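-- pv_equiv track=rewrite | github.com/RaulPetcu/Python_Programming | Lab3/lab2_ex7.py | setOperation
-- ===== SOURCE A (Python) =====
-- def setOperation(set1, set2):
--     result = []
--     intersection = []
--     intersection = list(set(set1) & set(set2))
--
--     reunion = []
--     reunion = list(set(set1) | set(set2))
--
--     uniquesFromSet1 = []
--     for el in set1:
--         if el not in set2:
--             uniquesFromSet1.append(el)
--
--     uniquesFromSet2 = []
--     for el in set2:
--         if el not in set1:
--             uniquesFromSet2.append(el)
--
--     result.append(len(reunion))
--     result.append(len(intersection))
--     result.append(len(uniquesFromSet1))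
--     result.append(len(uniquesFromSet2))
--
--     return result
-- ===== SOURCE B (Python) =====
-- def _groups(xs):
--     """Run-length encode sorted(xs): list of (key, multiplicity) with strictly increasing keys."""
--     out = []
--     for x in sorted(xs):
--         if out and out[-1][0] == x:
--             out[-1] = (x, out[-1][1] + 1)
--         else:
--             out.append((x, 1))
--     return out
--
--
-- def setOperation(set1, set2):
--     g1 = _groups(set1)
--     g2 = _groups(set2)
--     union = inter = u1 = u2 = 0
--     i = j = 0
--     while i < len(g1) or j < len(g2):
--         if j == len(g2):
--             union += 1; u1 += g1[i][1]; i += 1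
--         elif i == len(g1):
--             union += 1; u2 += g2[j][1]; j += 1
--         elif g1[i][0] < g2[j][0]:
--             union += 1; u1 += g1[i][1]; i += 1
--         elif g2[j][0] < g1[i][0]:
--             union += 1; u2 += g2[j][1]; j += 1
--         else:
--             union += 1; inter += 1; i += 1; j += 1
--     return [union, inter, u1, u2]
-- ===== Notes on version B (the rewrite author's own statement) =====
-- stated objective: faster
-- what changed: Replaces set objects and per-element list membership scans with sorting both lists, run-length encoding them into (key, multiplicity) groups, and computing all four counts in one two-pointer merge of the two sorted group lists.
import Mathlib
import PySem

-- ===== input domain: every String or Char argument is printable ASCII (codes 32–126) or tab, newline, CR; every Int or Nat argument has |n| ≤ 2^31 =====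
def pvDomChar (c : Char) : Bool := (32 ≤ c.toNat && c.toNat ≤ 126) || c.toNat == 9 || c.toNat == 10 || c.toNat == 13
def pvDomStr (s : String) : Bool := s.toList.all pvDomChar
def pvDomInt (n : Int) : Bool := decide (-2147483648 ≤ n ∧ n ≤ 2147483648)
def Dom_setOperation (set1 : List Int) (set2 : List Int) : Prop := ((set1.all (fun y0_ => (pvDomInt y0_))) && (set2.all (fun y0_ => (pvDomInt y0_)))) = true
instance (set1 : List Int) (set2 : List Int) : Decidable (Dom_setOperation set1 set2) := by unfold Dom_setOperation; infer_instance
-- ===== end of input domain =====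

-- B replaces per-element list membership scans by sort, run-length encode, and a two-pointer merge.

-- ===== PORT A =====
def setOperation (set1 : List Int) (set2 : List Int) : List Int :=
  let intersection := PySem.Set.inter (PySem.Set.ofList set1) (PySem.Set.ofList set2)
  let reunion := PySem.Set.union (PySem.Set.ofList set1) (PySem.Set.ofList set2)
  let uniquesFromSet1 := set1.foldl (fun acc el => if set2.contains el then acc else acc ++ [el]) []
  let uniquesFromSet2 := set2.foldl (fun acc el => if set1.contains el then acc else acc ++ [el]) []
  [(reunion.length : Int), (intersection.length : Int),
   (uniquesFromSet1.length : Int), (uniquesFromSet2.length : Int)]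

-- ===== PORT B =====
-- one step of _groups' loop: 'if out and out[-1][0] == x: bump last count else append (x,1)'
def pvGroupStep (out : List (Int × Int)) (x : Int) : List (Int × Int) :=
  match out.getLast? with
  | some (k, c) => if k == x then out.dropLast ++ [(x, c + 1)] else out ++ [(x, 1)]
  | none => [(x, 1)]

-- _groups: run-length encoding of sorted(xs)
def pvGroups (xs : List Int) : List (Int × Int) :=
  (PySem.List.sorted xs (fun x => x) false).foldl pvGroupStep []

-- the two-pointer merge loop (indices become structural consumption of the two group lists)
def pvMerge : List (Int × Int) → List (Int × Int) → Int × Int × Int × Int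
  | [], [] => (0, 0, 0, 0)
  | (_, c) :: g1, [] =>
      let r := pvMerge g1 []
      (r.1 + 1, r.2.1, r.2.2.1 + c, r.2.2.2)
  | [], (_, c) :: g2 =>
      let r := pvMerge [] g2
      (r.1 + 1, r.2.1, r.2.2.1, r.2.2.2 + c)
  | (k1, c1) :: g1, (k2, c2) :: g2 =>
      if k1 < k2 then
        let r := pvMerge g1 ((k2, c2) :: g2)
        (r.1 + 1, r.2.1, r.2.2.1 + c1, r.2.2.2)
      else if k2 < k1 then
        let r := pvMerge ((k1, c1) :: g1) g2
        (r.1 + 1, r.2.1, r.2.2.1, r.2.2.2 + c2)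
      else
        let r := pvMerge g1 g2
        (r.1 + 1, r.2.1 + 1, r.2.2.1, r.2.2.2)
  termination_by g1 g2 => g1.length + g2.length

def setOperation_alt (set1 : List Int) (set2 : List Int) : List Int :=
  let g1 := pvGroups set1
  let g2 := pvGroups set2
  let r := pvMerge g1 g2
  [r.1, r.2.1, r.2.2.1, r.2.2.2]

-- ===== PRECONDITION & SPEC =====
def Spec_setOperation (set1 : List Int) (set2 : List Int) (out : List Int) : Prop := out = setOperation_alt set1 set2
instance (set1 : List Int) (set2 : List Int) (out : List Int) : Decidable (Spec_setOperation set1 set2 out) := by unfold Spec_setOperation; infer_instance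

-- ===== CLAIM (what is proved, stated in full; the proofs are below) =====
def Claim_equal_setOperation : Prop := ∀ (set1 : List Int) (set2 : List Int), Dom_setOperation set1 set2 → Spec_setOperation set1 set2 (setOperation set1 set2)

-- ===== LEMMAS AND PROOFS =====

-- A's unique-element loop is a filter
lemma foldl_filter_not (p : Int → Bool) (xs acc : List Int) :
    xs.foldl (fun acc el => if p el then acc else acc ++ [el]) acc
      = acc ++ xs.filter (fun el => !p el) := by
  induction xs generalizing acc with
  | nil => simp
  | cons x t ih => by_cases h : p x <;> simp [List.filter_cons, h, ih]

-- PySem.Set.ofList xs (= first-occurrence dedup) is a sublist of xs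
lemma ofList_sublist (xs : List Int) : (PySem.Set.ofList xs).Sublist xs := by
  induction xs using List.reverseRecOn with
  | nil => simp [PySem.Set.ofList]
  | append_singleton l x ih =>
    rw [PySem.Set.ofList_append_singleton]
    by_cases h : x ∈ PySem.Set.ofList l
    · rw [PySem.Set.add_of_mem h]
      exact ih.trans (List.sublist_append_left l [x])
    · rw [PySem.Set.add_of_not_mem h]
      exact ih.append (List.Sublist.refl [x])

-- dedup of a ≤-sorted list is strictly sorted
lemma dedup_pairwise_lt (l : List Int) (h : l.Pairwise (· ≤ ·)) :
    (PySem.Set.ofList l).Pairwise (· < ·) := by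
  have h1 : (PySem.Set.ofList l).Pairwise (· ≤ ·) := h.sublist (ofList_sublist l)
  have h2 : (PySem.Set.ofList l).Pairwise (· ≠ ·) := PySem.Set.nodup_ofList l
  exact (h1.and h2).imp (fun h => lt_of_le_of_ne h.1 h.2)

-- every member of a strictly sorted list is ≤ its last element
lemma pairwise_lt_mem_le_getLast (l : List Int) (hne : l ≠ []) (h : l.Pairwise (· < ·))
    (a : Int) (ha : a ∈ l) : a ≤ l.getLast hne := by
  have hsplit := List.dropLast_append_getLast hne
  have hp : ∀ b ∈ l.dropLast, b < l.getLast hne := by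
    have := hsplit ▸ h
    have := List.pairwise_append.mp this
    intro b hb
    exact this.2.2 b hb _ (List.mem_singleton_self _)
  rw [← hsplit] at ha
  rcases List.mem_append.mp ha with hb | hb
  · exact le_of_lt (hp a hb)
  · simp at hb; omega

-- characterization of _groups' fold over a ≤-sorted list
lemma groups_fold_eq (l : List Int) (h : l.Pairwise (· ≤ ·)) :
    l.foldl pvGroupStep [] = (PySem.Set.ofList l).map (fun k => (k, (l.count k : Int))) := by
  induction l using List.reverseRecOn with
  | nil => simp [PySem.Set.ofList_nil]
  | append_singleton l x ih =>
    have hl : l.Pairwise (· ≤ ·) := h.sublist (List.sublist_append_left l [x])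
    have hle : ∀ a ∈ l, a ≤ x := by
      have := List.pairwise_append.mp h
      intro a ha
      exact this.2.2 a ha x (List.mem_singleton_self _)
    rw [List.foldl_append, ih hl, List.foldl_cons, List.foldl_nil]
    rcases eq_or_ne l [] with rfl | hne
    · simp [pvGroupStep, PySem.Set.ofList_nil, PySem.Set.ofList]
    · have hDne : PySem.Set.ofList l ≠ [] := by
        obtain ⟨a, ha⟩ := List.exists_mem_of_ne_nil l hne
        intro hD
        exact absurd (((PySem.Set.mem_ofList l a).mpr ha)) (by simp [hD])
      have hDlt : (PySem.Set.ofList l).Pairwise (· < ·) := dedup_pairwise_lt l hl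
      set D := PySem.Set.ofList l with hD
      set d := D.getLast hDne with hd
      have hd_mem : d ∈ l := (PySem.Set.mem_ofList l d).mp (List.getLast_mem hDne)
      have hdx : d ≤ x := hle d hd_mem
      have hlast : ((D.map (fun k => (k, (l.count k : Int)))).getLast?) = some (d, (l.count d : Int)) := by
        rw [List.getLast?_map, List.getLast?_eq_some_getLast hDne]
        rfl
      have hdrop : ∀ k ∈ D.dropLast, k < d := by
        intro k hk
        have hsplit := List.dropLast_append_getLast hDne
        have := List.pairwise_append.mp (hsplit ▸ hDlt)
        exact this.2.2 k hk d (by rw [← hd]; exact List.mem_singleton_self _)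
      unfold pvGroupStep
      rw [hlast]
      dsimp only
      by_cases hxd : d = x
      · -- x is the last existing key: bump its count
        have hxl : x ∈ l := hxd ▸ hd_mem
        have hofl : PySem.Set.ofList (l ++ [x]) = D := by
          rw [PySem.Set.ofList_append_singleton, PySem.Set.add_of_mem ((PySem.Set.mem_ofList l x).mpr hxl), hD]
        rw [if_pos (by simp [hxd]), hofl]
        have hsplit : D = D.dropLast ++ [d] := (List.dropLast_append_getLast hDne).symm
        calc (D.map (fun k => (k, (l.count k : Int)))).dropLast ++ [(x, (l.count d : Int) + 1)]
            = (D.dropLast).map (fun k => (k, (l.count k : Int))) ++ [(x, (l.count d : Int) + 1)] := by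
              rw [← List.map_dropLast]
          _ = (D.dropLast).map (fun k => (k, ((l ++ [x]).count k : Int))) ++ [(x, ((l ++ [x]).count x : Int))] := by
              congr 1
              · apply List.map_congr_left
                intro k hk
                have : k ≠ x := by have := hdrop k hk; omega
                simp [List.count_append, List.count_singleton, Ne.symm this]
              · simp [List.count_append, List.count_singleton, hxd]
          _ = (D.dropLast ++ [d]).map (fun k => (k, ((l ++ [x]).count k : Int))) := by
              simp [hxd]
          _ = D.map (fun k => (k, ((l ++ [x]).count k : Int))) := by rw [← hsplit]
      · -- new largest key
        have hxl : x ∉ l := by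
          intro hxl
          have hxD : x ∈ D := (PySem.Set.mem_ofList l x).mpr hxl
          have := pairwise_lt_mem_le_getLast D hDne hDlt x hxD
          omega
        have hofl : PySem.Set.ofList (l ++ [x]) = D ++ [x] := by
          rw [PySem.Set.ofList_append_singleton, PySem.Set.add_of_not_mem (fun hm => hxl ((PySem.Set.mem_ofList l x).mp hm)), hD]
        rw [if_neg (by simp; omega), hofl, List.map_append]
        congr 1
        · apply List.map_congr_left
          intro k hk
          have hkl : k ∈ l := (PySem.Set.mem_ofList l k).mp hk
          have : k ≠ x := fun e => hxl (e ▸ hkl)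
          simp [List.count_append, List.count_singleton, Ne.symm this]
        · simp [List.count_append, List.count_singleton, List.count_eq_zero.mpr hxl]

-- merge characterization on strictly key-sorted group lists
lemma merge_eq (g1 g2 : List (Int × Int))
    (h1 : (g1.map Prod.fst).Pairwise (· < ·)) (h2 : (g2.map Prod.fst).Pairwise (· < ·)) :
    pvMerge g1 g2 =
      ((g1.length : Int) + g2.length - ((g1.map Prod.fst).countP (fun k => (g2.map Prod.fst).contains k) : Int),
       ((g1.map Prod.fst).countP (fun k => (g2.map Prod.fst).contains k) : Int),
       ((g1.filter (fun p => !(g2.map Prod.fst).contains p.1)).map Prod.snd).sum,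
       ((g2.filter (fun p => !(g1.map Prod.fst).contains p.1)).map Prod.snd).sum) := by
  fun_induction pvMerge g1 g2 with
  | case1 => simp
  | case2 k c t r ih =>
    rw [List.map_cons, List.pairwise_cons] at h1
    have hih := ih h1.2 (by simp)
    have hr : r = pvMerge t [] := rfl
    rw [hr, hih]
    simp only [ List.map_nil, List.map_cons, List.length_cons, List.length_nil,
      List.contains_nil, List.countP_false, List.filter_cons, Bool.not_false, if_pos rfl,
      List.filter_nil, List.sum_cons, List.sum_nil] at *
    push_cast
    refine Prod.ext ?_ (Prod.ext ?_ (Prod.ext ?_ ?_)) <;> simp <;> omega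
  | case3 k c t r ih =>
    rw [List.map_cons, List.pairwise_cons] at h2
    have hih := ih (by simp) h2.2
    have hr : r = pvMerge [] t := rfl
    rw [hr, hih]
    simp only [ List.map_nil, List.map_cons, List.length_cons, List.length_nil,
      List.contains_nil, List.countP_false, List.countP_nil, List.filter_cons, Bool.not_false,
      List.filter_nil, List.sum_cons, List.sum_nil] at *
    push_cast
    refine Prod.ext ?_ (Prod.ext ?_ (Prod.ext ?_ ?_)) <;> simp <;> omega
  | case4 k1 c1 t1 k2 c2 t2 hlt r ih =>
    rw [List.map_cons, List.pairwise_cons] at h1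
    have hih := ih h1.2 h2
    have hr : r = pvMerge t1 ((k2, c2) :: t2) := rfl
    rw [hr, hih]
    rw [List.map_cons, List.pairwise_cons] at h2
    have hk1 : ∀ y ∈ k2 :: t2.map Prod.fst, k1 < y := by
      intro y hy
      rcases List.mem_cons.mp hy with rfl | hy
      · exact hlt
      · exact hlt.trans (h2.1 y hy)
    have hk1mem : k1 ∉ k2 :: t2.map Prod.fst := fun hy => absurd (hk1 _ hy) (lt_irrefl _)
    have hcongr : ∀ p ∈ (k2, c2) :: t2,
        (!((k1 :: t1.map Prod.fst).contains p.1)) = (!(t1.map Prod.fst).contains p.1) := by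
      intro p hp
      have hgt : k1 < p.1 := by
        rcases List.mem_cons.mp hp with rfl | hp
        · exact hlt
        · exact hlt.trans (h2.1 p.1 (List.mem_map_of_mem hp))
      have : p.1 ≠ k1 := by omega
      simp [List.contains_cons, this]
    simp only [List.map_cons]
    rw [List.filter_congr hcongr]
    simp only [List.map_cons, List.length_cons, List.countP_cons, List.filter_cons,
      List.sum_cons]
    simp only [List.contains_iff_mem]
    simp [hk1mem]
    push_cast
    omega
  | case5 k1 c1 t1 k2 c2 t2 hlt hgt r ih =>
    rw [List.map_cons, List.pairwise_cons] at h2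
    have hih := ih h1 h2.2
    have hr : r = pvMerge ((k1, c1) :: t1) t2 := rfl
    rw [hr, hih]
    rw [List.map_cons, List.pairwise_cons] at h1
    have hk2 : ∀ y ∈ k1 :: t1.map Prod.fst, k2 < y := by
      intro y hy
      rcases List.mem_cons.mp hy with rfl | hy
      · exact hgt
      · exact hgt.trans (h1.1 y hy)
    have hk2mem : k2 ∉ k1 :: t1.map Prod.fst := fun hy => absurd (hk2 _ hy) (lt_irrefl _)
    have hcongr : ∀ p ∈ (k1, c1) :: t1,
        (!((k2 :: t2.map Prod.fst).contains p.1)) = (!(t2.map Prod.fst).contains p.1) := by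
      intro p hp
      have hgt' : k2 < p.1 := by
        rcases List.mem_cons.mp hp with rfl | hp
        · exact hgt
        · exact hgt.trans (h1.1 p.1 (List.mem_map_of_mem hp))
      have : p.1 ≠ k2 := by omega
      simp [List.contains_cons, this]
    have hcntP : List.countP (fun k => (k2 :: t2.map Prod.fst).contains k) (k1 :: t1.map Prod.fst)
        = List.countP (fun k => (t2.map Prod.fst).contains k) (k1 :: t1.map Prod.fst) := by
      apply List.countP_congr
      intro y hy
      have : y ≠ k2 := by have := hk2 y hy; omega
      simp [List.contains_cons, this]
    simp only [List.map_cons]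
    rw [List.filter_congr hcongr, hcntP]
    simp only [List.map_cons, List.length_cons, List.countP_cons, List.filter_cons,
      List.sum_cons]
    simp only [List.contains_iff_mem]
    simp [hk2mem]
    push_cast
    omega
  | case6 k1 c1 t1 k2 c2 t2 hlt hgt r ih =>
    have hk : k1 = k2 := by omega
    subst hk
    rw [List.map_cons, List.pairwise_cons] at h1 h2
    have hih := ih h1.2 h2.2
    have hr : r = pvMerge t1 t2 := rfl
    rw [hr, hih]
    have hc1 : ∀ p ∈ t1, (!((k1 :: t2.map Prod.fst).contains p.1)) = (!(t2.map Prod.fst).contains p.1) := by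
      intro p hp
      have : p.1 ≠ k1 := by have := h1.1 p.1 (List.mem_map_of_mem hp); omega
      simp [List.contains_cons, this]
    have hc2 : ∀ p ∈ t2, (!((k1 :: t1.map Prod.fst).contains p.1)) = (!(t1.map Prod.fst).contains p.1) := by
      intro p hp
      have : p.1 ≠ k1 := by have := h2.1 p.1 (List.mem_map_of_mem hp); omega
      simp [List.contains_cons, this]
    have hcntP : List.countP (fun k => (k1 :: t2.map Prod.fst).contains k) (t1.map Prod.fst)
        = List.countP (fun k => (t2.map Prod.fst).contains k) (t1.map Prod.fst) := by
      apply List.countP_congr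
      intro y hy
      have : y ≠ k1 := by have := h1.1 y hy; omega
      simp [List.contains_cons, this]
    simp only [List.map_cons, List.length_cons, List.countP_cons, List.filter_cons, List.sum_cons]
    rw [List.filter_congr hc1, List.filter_congr hc2, hcntP]
    simp [List.contains_cons]
    push_cast
    omega

-- a nodup list's length is the card of its members as a finset
lemma nodup_length_card (L : List Int) (hL : L.Nodup) (F : Finset Int)
    (hmem : ∀ a, a ∈ L ↔ a ∈ F) : L.length = F.card := by
  rw [← List.toFinset_card_of_nodup hL]
  congr 1
  ext a
  simp [hmem]

-- a countP over a nodup list is an intersection card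
lemma countP_card (L : List Int) (hL : L.Nodup) (X Y : List Int)
    (hmem : ∀ a, a ∈ L ↔ a ∈ X) (p : Int → Bool) (hp : ∀ a, p a = true ↔ a ∈ Y) :
    L.countP p = (X.toFinset ∩ Y.toFinset).card := by
  rw [List.countP_eq_length_filter]
  have hnd : (L.filter p).Nodup := hL.filter _
  rw [← List.toFinset_card_of_nodup hnd]
  congr 1
  ext a
  simp only [List.toFinset_filter, Finset.mem_filter, List.mem_toFinset, Finset.mem_inter]
  constructor
  · rintro ⟨ha, hpa⟩; exact ⟨(hmem a).mp ha, (hp a).mp hpa⟩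
  · rintro ⟨hx, hy⟩; exact ⟨(hmem a).mpr hx, (hp a).mpr hy⟩

-- multiplicity sum over the distinct filtered keys is the filtered length
lemma sum_count_filter (L xs : List Int) (hL : L.Nodup) (hmem : ∀ a, a ∈ L ↔ a ∈ xs)
    (p : Int → Bool) :
    ((L.filter p).map (fun k => ((xs.count k : Nat) : Int))).sum = ((xs.filter p).length : Int) := by
  set l := xs.filter p with hl
  have hperm : List.Perm (L.filter p) l.dedup := by
    apply List.perm_of_nodup_nodup_toFinset_eq
    · exact hL.filter p
    · exact l.nodup_dedup
    · ext a
      simp [hl, List.mem_filter, hmem, and_comm]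
  have hmapcongr : l.dedup.map (fun k => ((xs.count k : Nat) : Int))
      = l.dedup.map (fun k => ((l.count k : Nat) : Int)) := by
    apply List.map_congr_left
    intro k hk
    have hkl : k ∈ l := List.mem_dedup.mp hk
    have hpk : p k = true := (List.mem_filter.mp hkl).2
    simp [hl, List.count_filter, hpk]
  calc ((L.filter p).map (fun k => ((xs.count k : Nat) : Int))).sum
      = (l.dedup.map (fun k => ((xs.count k : Nat) : Int))).sum := (hperm.map _).sum_eq
    _ = (l.dedup.map (fun k => ((l.count k : Nat) : Int))).sum := by rw [hmapcongr]
    _ = ((l.length : Nat) : Int) := by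
        rw [show (fun k => ((l.count k : Nat) : Int)) = (Nat.cast : Nat → Int) ∘ (fun k => l.count k) from rfl,
            ← List.map_map, ← Nat.cast_list_sum, List.sum_map_count_dedup_eq_length]

-- membership of the sorted-dedup key list is plain list membership
lemma mem_keys_iff (xs : List Int) (a : Int) :
    a ∈ PySem.Set.ofList (PySem.List.sorted xs (fun x => x) false) ↔ a ∈ xs := by
  rw [PySem.Set.mem_ofList, PySem.List.mem_sorted]

lemma contains_keys_eq (xs : List Int) (a : Int) :
    List.contains (PySem.Set.ofList (PySem.List.sorted xs (fun x => x) false)) a = xs.contains a := by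
  by_cases h : a ∈ xs <;>
    simp [List.contains_iff_mem, mem_keys_iff, h]

-- pvGroups in closed form
lemma pvGroups_eq (xs : List Int) :
    pvGroups xs = (PySem.Set.ofList (PySem.List.sorted xs (fun x => x) false)).map
      (fun k => (k, ((PySem.List.sorted xs (fun x => x) false).count k : Int))) := by
  unfold pvGroups
  apply groups_fold_eq
  have := PySem.List.sorted_pairwise (xs := xs) (key := fun x => x)
  simpa using this

-- keys of pvGroups
lemma keys_pvGroups (xs : List Int) :
    (pvGroups xs).map Prod.fst = PySem.Set.ofList (PySem.List.sorted xs (fun x => x) false) := by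
  rw [pvGroups_eq, List.map_map]
  have hid : ((Prod.fst : Int × Int → Int) ∘ fun k => (k, ((PySem.List.sorted xs (fun x => x) false).count k : Int))) = id := rfl
  rw [hid, List.map_id]

-- the number of groups is the number of distinct elements
lemma length_pvGroups (xs : List Int) : (pvGroups xs).length = xs.toFinset.card := by
  rw [pvGroups_eq, List.length_map]
  exact nodup_length_card _ (PySem.Set.nodup_ofList _) _
    (fun a => by rw [mem_keys_iff]; simp)

-- the merge's shared-key count is the intersection cardinality
lemma countP_keys (xs ys : List Int) :
    List.countP (fun k => List.contains (PySem.Set.ofList (PySem.List.sorted ys (fun x => x) false)) k)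
        (PySem.Set.ofList (PySem.List.sorted xs (fun x => x) false))
      = (xs.toFinset ∩ ys.toFinset).card := by
  apply countP_card _ (PySem.Set.nodup_ofList _) xs ys (fun a => mem_keys_iff xs a)
  intro a
  rw [contains_keys_eq]
  simp [List.contains_iff_mem]

-- the unique-side sum of pvGroups is a filtered length of the original list
lemma sum_pvGroups_filter (xs : List Int) (p : Int → Bool) :
    (((pvGroups xs).filter (fun q => !p q.1)).map Prod.snd).sum
      = ((xs.filter (fun el => !p el)).length : Int) := by
  rw [pvGroups_eq, List.filter_map, List.map_map]
  simp only [Function.comp_def]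
  rw [sum_count_filter (PySem.Set.ofList (PySem.List.sorted xs (fun x => x) false))
      (PySem.List.sorted xs (fun x => x) false) (PySem.Set.nodup_ofList _)
      (fun a => PySem.Set.mem_ofList _ a) (fun k => !p k)]
  have : ((PySem.List.sorted xs (fun x => x) false).filter (fun el => !p el)).length
      = (xs.filter (fun el => !p el)).length :=
    ((PySem.List.sorted_perm xs (fun x => x) false).filter _).length_eq
  rw [this]

-- the whole unique side of the merge
lemma unique_side (xs ys : List Int) :
    (((pvGroups xs).filter (fun q => !((pvGroups ys).map Prod.fst).contains q.1)).map Prod.snd).sum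
      = ((xs.filter (fun el => !ys.contains el)).length : Int) := by
  rw [keys_pvGroups]
  have hpc : (fun q : Int × Int => !List.contains (PySem.Set.ofList (PySem.List.sorted ys (fun x => x) false)) q.1)
      = (fun q : Int × Int => !ys.contains q.1) := by
    funext q
    rw [contains_keys_eq]
  rw [hpc]
  exact sum_pvGroups_filter xs (fun k => ys.contains k)

-- A's intersection and union as finset cardinalities
lemma A_inter_card (s1 s2 : List Int) :
    (PySem.Set.inter (PySem.Set.ofList s1) (PySem.Set.ofList s2)).length
      = (s1.toFinset ∩ s2.toFinset).card := by
  apply nodup_length_card _ (PySem.Set.nodup_inter _ _ (PySem.Set.nodup_ofList s1))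
  intro a
  rw [PySem.Set.mem_inter]
  simp [PySem.Set.mem_ofList]

lemma A_union_card (s1 s2 : List Int) :
    (PySem.Set.union (PySem.Set.ofList s1) (PySem.Set.ofList s2)).length
      = (s1.toFinset ∪ s2.toFinset).card := by
  apply nodup_length_card _ (PySem.Set.nodup_union _ _ (PySem.Set.nodup_ofList s1))
  intro a
  rw [PySem.Set.mem_union]
  simp [PySem.Set.mem_ofList]

-- ===== VERDICT (by name: the statement is the Claim_ definition above) =====
theorem setOperation_spec : Claim_equal_setOperation := by
  intro s1 s2 _
  unfold Spec_setOperation setOperation setOperation_alt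
  dsimp only
  have hmerge := merge_eq (pvGroups s1) (pvGroups s2)
    (by rw [keys_pvGroups]
        exact dedup_pairwise_lt _ (by simpa using PySem.List.sorted_pairwise (xs := s1) (key := fun x => x)))
    (by rw [keys_pvGroups]
        exact dedup_pairwise_lt _ (by simpa using PySem.List.sorted_pairwise (xs := s2) (key := fun x => x)))
  rw [hmerge, unique_side s1 s2, unique_side s2 s1,
      foldl_filter_not, foldl_filter_not, List.nil_append, List.nil_append,
      A_inter_card, A_union_card, length_pvGroups, length_pvGroups,
      keys_pvGroups s1, keys_pvGroups s2, countP_keys s1 s2]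
  have hUIE : (s1.toFinset ∪ s2.toFinset).card + (s1.toFinset ∩ s2.toFinset).card
      = s1.toFinset.card + s2.toFinset.card := Finset.card_union_add_card_inter _ _
  refine List.ext_getElem (by simp) ?_
  intro n h1 h2
  simp only [List.length_cons, List.length_nil] at h1
  interval_cases n <;> simp <;> push_cast <;> omega
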